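-- pv_equiv track=rewrite | github.com/NehaHeralgi/infyTQ-Python-Practice-level1 | check_occurence.py | check_occurence
-- ===== SOURCE A (Python) =====
-- def check_occurence(string):
--     cj=0
--     cm=0
--     st1=string.lower()
--     st=st1.split(" ")
--
--     word1="jet"
--     word2="mat"
--
--     for i in st:
--         if i==word1:
--             cj=cj+1
--
--     for i in st:
--         if i==word2:
--             cm=cm+1
--
--     if cj==cm:
--         return True
--     else:
--         return False
-- ===== SOURCE B (Python) =====
-- def check_occurence(string):
--     balance = 0
--     for w in string.lower().split(" "):
--         if w == "jet":
--             balance += 1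
--         elif w == "mat":
--             balance -= 1
--     return balance == 0
-- ===== Notes on version B (the rewrite author's own statement) =====
-- stated objective: simpler
-- what changed: Replaces A's two separate counting loops and equality comparison with a single pass maintaining one signed balance (+1 per 'jet', -1 per 'mat') that is checked against zero.
import Mathlib
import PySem

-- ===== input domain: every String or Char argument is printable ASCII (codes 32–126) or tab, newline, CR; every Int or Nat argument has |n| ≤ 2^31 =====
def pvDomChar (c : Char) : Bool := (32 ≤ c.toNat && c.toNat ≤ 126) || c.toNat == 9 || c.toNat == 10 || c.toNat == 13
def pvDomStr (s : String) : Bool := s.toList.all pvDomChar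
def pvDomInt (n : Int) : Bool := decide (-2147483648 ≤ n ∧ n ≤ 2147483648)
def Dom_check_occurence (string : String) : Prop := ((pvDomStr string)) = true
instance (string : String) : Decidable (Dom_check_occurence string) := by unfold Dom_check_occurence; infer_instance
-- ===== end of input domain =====

-- B replaces A's two counting loops with a single pass over the words keeping one
-- signed balance (+1 per "jet", -1 per "mat") and testing it against zero (simpler).

-- ===== PORT A =====
def check_occurence (string : String) : Bool :=
  let st1 := PySem.Str.lower string
  let st := (PySem.Str.split? st1 " ").getD []
  let cj : Int := st.foldl (fun cj i => if i == "jet" then cj + 1 else cj) 0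
  let cm : Int := st.foldl (fun cm i => if i == "mat" then cm + 1 else cm) 0
  if cj == cm then true else false

-- ===== PORT B =====
def check_occurence_alt (string : String) : Bool :=
  let balance : Int :=
    ((PySem.Str.split? (PySem.Str.lower string) " ").getD []).foldl
      (fun b w => if w == "jet" then b + 1 else if w == "mat" then b - 1 else b) 0
  balance == 0

-- ===== PRECONDITION & SPEC =====
def Spec_check_occurence (string : String) (out : Bool) : Prop := out = check_occurence_alt string
instance (string : String) (out : Bool) : Decidable (Spec_check_occurence string out) := by unfold Spec_check_occurence; infer_instance

-- ===== CLAIM =====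
def Claim_equal_check_occurence : Prop := ∀ (string : String), Dom_check_occurence string → Spec_check_occurence string (check_occurence string)

-- ===== LEMMAS AND PROOFS =====
theorem foldl_if_count (w : String) (xs : List String) (a : Int) :
    xs.foldl (fun c i => if i == w then c + 1 else c) a = a + xs.count w := by
  induction xs generalizing a with
  | nil => simp
  | cons x xs ih =>
    simp only [List.foldl_cons, List.count_cons, ih]
    by_cases h : x = w <;> (simp [h]; try ring)

theorem foldl_balance (xs : List String) (a : Int) :
    xs.foldl (fun b w => if w == "jet" then b + 1 else if w == "mat" then b - 1 else b) a
      = a + xs.count "jet" - xs.count "mat" := by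
  induction xs generalizing a with
  | nil => simp
  | cons x xs ih =>
    simp only [List.foldl_cons, List.count_cons, ih]
    by_cases h1 : x = "jet"
    · simp [h1]; ring
    · by_cases h2 : x = "mat" <;> (simp [h1, h2]; try ring)

-- ===== VERDICT =====
theorem check_occurence_spec : Claim_equal_check_occurence := by
  intro s _
  unfold Spec_check_occurence check_occurence check_occurence_alt
  simp only [foldl_if_count, foldl_balance, zero_add]
  generalize (List.count "jet" ((PySem.Str.split? (PySem.Str.lower s) " ").getD []) : Int) = a
  generalize (List.count "mat" ((PySem.Str.split? (PySem.Str.lower s) " ").getD []) : Int) = b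
  by_cases h : a = b <;> simp [h] <;> omega
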